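-- pv_equiv track=rewrite | github.com/mingoogle/algorithm | codility/lesson7_4_stone_wall.py | solution
-- ===== SOURCE A (Python) =====
-- def solution(H):
--     # 1. 블록의 수와 stack 배열을 선언한다.
--     block_count = 0
--     stack_arr = []
--
--     # 2. 건물을 순회하면서 기존 건물보다 작은 건물이 들어온다면 stack_arr를 작은 블록으로 초기화하고 하나의 블록으로 만드는건 끝났으니 block_count를 +1을 해준다
--     for i in range(len(H)):
--         while len(stack_arr) > 0 and stack_arr[-1] > H[i]:
--             stack_arr.pop()
--
--         if len(stack_arr) == 0 or stack_arr[-1] < H[i]: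
--             block_count += 1
--             stack_arr.append(H[i])
--
--     return block_count
-- ===== SOURCE B (Python) =====
-- def solution(H):
--     # Index i starts a new block iff, scanning left from i, the first height <= H[i]
--     # is strictly smaller than H[i] (or no such height exists).
--     count = 0
--     for i in range(len(H)):
--         new_block = True
--         for j in range(i - 1, -1, -1):
--             if H[j] == H[i]:
--                 new_block = False
--                 break
--             if H[j] < H[i]:
--                 break
--         if new_block:
--             count += 1
--     return count
-- ===== Notes on version B (the rewrite author's own statement) =====
-- stated objective: simpler
-- what changed: Replaces A's explicit shrinking stack by a direct per-index rule with no auxiliary data structure: index i starts a new block iff, scanning left from i, the first height <= H[i] is strictly smaller than H[i] (or no such height exists).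
import Mathlib
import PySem

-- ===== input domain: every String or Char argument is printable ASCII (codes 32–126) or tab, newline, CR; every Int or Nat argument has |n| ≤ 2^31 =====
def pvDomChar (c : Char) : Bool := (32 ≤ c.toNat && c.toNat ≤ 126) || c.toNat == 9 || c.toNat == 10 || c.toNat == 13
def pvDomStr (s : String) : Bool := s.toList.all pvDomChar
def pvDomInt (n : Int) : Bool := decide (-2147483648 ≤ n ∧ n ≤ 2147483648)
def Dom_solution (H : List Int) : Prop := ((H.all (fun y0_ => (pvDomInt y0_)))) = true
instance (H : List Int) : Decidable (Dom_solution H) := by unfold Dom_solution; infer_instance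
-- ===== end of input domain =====

-- B replaces A's explicit stack by a direct per-index rule (scan left for the first height ≤ H[i]); simpler, same return value.

-- ===== PORT A =====
-- the inner 'while' loop: pop from the end while the last element is > h
def popLoop (st : List Int) (h : Int) : List Int :=
  match hst : st.getLast? with
  | some t => if h < t then popLoop st.dropLast h else st
  | none => st
termination_by st.length
decreasing_by
  cases st with
  | nil => simp at hst
  | cons a l => simp [List.length_dropLast]

-- one iteration of the 'for' loop: state = (block_count, stack_arr)
def stepA (s : Int × List Int) (h : Int) : Int × List Int :=
  let st := popLoop s.2 h
  match st.getLast? with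
  | none => (s.1 + 1, st ++ [h])
  | some t => if t < h then (s.1 + 1, st ++ [h]) else (s.1, st)

def solution (H : List Int) : Int := (H.foldl stepA (0, [])).1

-- ===== PORT B =====
-- inner 'for j in range(i-1,-1,-1)' loop of Source B: rprev is the already-seen prefix, most recent first
def newBlock (rprev : List Int) (h : Int) : Bool :=
  match rprev with
  | [] => true
  | x :: xs => if x = h then false else if x < h then true else newBlock xs h

-- outer loop of Source B, carrying the reversed prefix and the counter
def goB (rprev : List Int) (rest : List Int) (c : Int) : Int :=
  match rest with
  | [] => c
  | h :: t => goB (h :: rprev) t (if newBlock rprev h then c + 1 else c)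

def solution_alt (H : List Int) : Int := goB [] H 0

-- ===== PRECONDITION & SPEC =====
def Spec_solution (H : List Int) (out : Int) : Prop := out = solution_alt H
instance (H : List Int) (out : Int) : Decidable (Spec_solution H out) := by unfold Spec_solution; infer_instance

-- ===== CLAIM (what is proved, stated in full; the proofs are below) =====
def Claim_equal_solution : Prop := ∀ (H : List Int), Dom_solution H → Spec_solution H (solution H)

-- ===== LEMMAS AND PROOFS =====

-- specification of A's stack after processing the reversed prefix rprev (top of stack at the HEAD here)
def S (rprev : List Int) : List Int :=
  match rprev with
  | [] => []
  | x :: xs =>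
    let t := (S xs).dropWhile (fun y => decide (x < y))
    if t.head? = some x then t else x :: t

lemma dropWhile_dropWhile (p q : Int → Bool) (hpq : ∀ a, q a = true → p a = true) (l : List Int) :
    (l.dropWhile q).dropWhile p = l.dropWhile p := by
  induction l with
  | nil => rfl
  | cons x xs ih =>
    by_cases hq : q x = true
    · simp [List.dropWhile, hq, hpq x hq, ih]
    · simp [List.dropWhile, hq]

lemma head?_dropWhile (p : Int → Bool) (l : List Int) (a : Int)
    (h : (l.dropWhile p).head? = some a) : p a = false := by
  induction l with
  | nil => simp [List.dropWhile] at h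
  | cons x xs ih =>
    by_cases hp : p x = true
    · exact ih (by simpa [List.dropWhile, hp] using h)
    · simp [List.dropWhile, hp] at h
      subst h
      simpa using hp

-- the head of S (x :: xs) is always x
lemma S_head (x : Int) (xs : List Int) : (S (x :: xs)).head? = some x := by
  simp only [S]
  split
  · assumption
  · rfl

-- popLoop over a reversed list is dropWhile
lemma popLoop_nil (h : Int) : popLoop [] h = [] := by
  unfold popLoop; rfl

lemma dropWhile_head_of_not (p : Int → Bool) (l : List Int) (a : Int)
    (hhd : l.head? = some a) (hpa : p a = false) : (l.dropWhile p).head? = some a := by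
  cases l with
  | nil => simp at hhd
  | cons y t =>
    injection hhd with hy
    subst hy
    simp [List.dropWhile, hpa]

lemma popLoop_concat (l : List Int) (x h : Int) :
    popLoop (l ++ [x]) h = if h < x then popLoop l h else l ++ [x] := by
  rw [popLoop]
  split
  · rename_i t hst
    rw [List.getLast?_concat] at hst
    injection hst with hst
    subst hst
    simp
  · rename_i hst
    rw [List.getLast?_concat] at hst
    simp at hst

lemma popLoop_reverse (l : List Int) (h : Int) :
    popLoop l.reverse h = (l.dropWhile (fun y => decide (h < y))).reverse := by
  induction l with
  | nil => simpa using popLoop_nil h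
  | cons x xs ih =>
    by_cases hx : h < x
    · simp [List.reverse_cons, popLoop_concat, hx, ih, List.dropWhile]
    · simp [List.reverse_cons, popLoop_concat, hx, List.dropWhile]

-- key correspondence: B's scan agrees with membership of h at the head of A's popped stack
lemma newBlock_iff (rprev : List Int) (h : Int) :
    newBlock rprev h = false ↔ ((S rprev).dropWhile (fun y => decide (h < y))).head? = some h := by
  induction rprev with
  | nil => simp [newBlock, S]
  | cons x xs ih =>
    by_cases hxh : x = h
    · rw [dropWhile_head_of_not _ _ x (S_head x xs) (by simp [hxh])]
      simp [newBlock, hxh]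
    · by_cases hlt : x < h
      · rw [dropWhile_head_of_not _ _ x (S_head x xs) (by simp; omega)]
        simp [newBlock, hxh, hlt]
      · have hgt : h < x := by omega
        have hcomp := dropWhile_dropWhile (fun y => decide (h < y)) (fun y => decide (x < y))
          (by intro a ha; simp at ha ⊢; omega) (S xs)
        have hstep : ((S (x :: xs)).dropWhile (fun y => decide (h < y)))
            = ((S xs).dropWhile (fun y => decide (h < y))) := by
          simp only [S]
          split
          · exact hcomp
          · rw [List.dropWhile_cons]
            simp only [decide_eq_true_eq]
            rw [if_pos hgt]
            exact hcomp
        rw [hstep]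
        simpa [newBlock, hxh, hlt] using ih

-- one step of A's fold, expressed through S and newBlock
lemma stepA_eq (rprev : List Int) (c h : Int) :
    stepA (c, (S rprev).reverse) h = ((if newBlock rprev h then c + 1 else c), (S (h :: rprev)).reverse) := by
  have hpop : popLoop (S rprev).reverse h = ((S rprev).dropWhile (fun y => decide (h < y))).reverse :=
    popLoop_reverse _ _
  have hS : S (h :: rprev)
      = if ((S rprev).dropWhile (fun y => decide (h < y))).head? = some h
        then (S rprev).dropWhile (fun y => decide (h < y))
        else h :: (S rprev).dropWhile (fun y => decide (h < y)) := rfl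
  cases hhd : ((S rprev).dropWhile (fun y => decide (h < y))).head? with
  | none =>
    have htnil : (S rprev).dropWhile (fun y => decide (h < y)) = [] := List.head?_eq_none_iff.mp hhd
    have hnb : newBlock rprev h = true := by
      cases hb : newBlock rprev h
      · exact absurd ((newBlock_iff rprev h).mp hb) (by rw [hhd]; simp)
      · rfl
    simp [stepA, hpop, htnil, hS, hnb]
  | some y =>
    have hpy : decide (h < y) = false := head?_dropWhile _ _ _ hhd
    have hyh : y ≤ h := by simpa using hpy
    have hgl : ((S rprev).dropWhile (fun y => decide (h < y))).reverse.getLast? = some y := by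
      rw [List.getLast?_reverse, hhd]
    by_cases hylt : y < h
    · have hne : ¬ (some y = (some h : Option Int)) := by intro hc; injection hc with hc; omega
      have hnb : newBlock rprev h = true := by
        cases hb : newBlock rprev h
        · exact absurd ((newBlock_iff rprev h).mp hb) (by rw [hhd]; exact hne)
        · rfl
      simp [stepA, hpop, hS, hhd, hgl, hylt, hne, hnb, List.reverse_cons]
    · have hye : y = h := by omega
      have hnb : newBlock rprev h = false := (newBlock_iff rprev h).mpr (by rw [hhd, hye])
      simp [stepA, hpop, hS, hhd, hgl, hnb, hye]

lemma goB_eq (rest rprev : List Int) (c : Int) :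
    goB rprev rest c = (rest.foldl stepA (c, (S rprev).reverse)).1 := by
  induction rest generalizing rprev c with
  | nil => simp [goB]
  | cons h t ih =>
    rw [goB, List.foldl_cons, stepA_eq]
    exact ih _ _

-- ===== VERDICT (by name: the statement is the Claim_ definition above) =====
theorem solution_spec : Claim_equal_solution := by
  intro H _
  unfold Spec_solution solution solution_alt
  rw [goB_eq]
  rfl
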